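-- pv_equiv track=rewrite | github.com/cjerzak/asa-software | asa/inst/python/workflows/audit_graph_workflow.py | _ordered_audit_columns
-- ===== SOURCE A (Python) =====
-- from typing import Any, Annotated, Dict, List, Optional, TypedDict
--
-- def _ordered_audit_columns(schema: Dict[str, str], data: List[Dict[str, Any]]) -> List[str]:
--     seen = set()
--     ordered = []
--
--     for field in (schema or {}).keys():
--         if field not in seen:
--             seen.add(field)
--             ordered.append(field)
--
--     for row in data:
--         if not isinstance(row, dict):
--             continue
--         for field in row.keys():
--             if field not in seen:
--                 seen.add(field)
--                 ordered.append(field)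
--
--     return ordered
-- ===== SOURCE B (Python) =====
-- def _ordered_audit_columns(schema, data):
--     keys = [field for field in (schema or {})]
--     for row in data:
--         if isinstance(row, dict):
--             keys.extend(row)
--     ordered = []
--     while keys:
--         head = keys[0]
--         ordered.append(head)
--         keys = [k for k in keys[1:] if k != head]
--     return ordered
-- ===== Notes on version B (the rewrite author's own statement) =====
-- stated objective: alternative
-- what changed: Instead of a seen-set guarding an ordered accumulator, B first concatenates all keys and then dedups by repeatedly emitting the head and deleting every later duplicate of it from the remaining stream, so no membership structure is maintained at all.
import Mathlib
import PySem

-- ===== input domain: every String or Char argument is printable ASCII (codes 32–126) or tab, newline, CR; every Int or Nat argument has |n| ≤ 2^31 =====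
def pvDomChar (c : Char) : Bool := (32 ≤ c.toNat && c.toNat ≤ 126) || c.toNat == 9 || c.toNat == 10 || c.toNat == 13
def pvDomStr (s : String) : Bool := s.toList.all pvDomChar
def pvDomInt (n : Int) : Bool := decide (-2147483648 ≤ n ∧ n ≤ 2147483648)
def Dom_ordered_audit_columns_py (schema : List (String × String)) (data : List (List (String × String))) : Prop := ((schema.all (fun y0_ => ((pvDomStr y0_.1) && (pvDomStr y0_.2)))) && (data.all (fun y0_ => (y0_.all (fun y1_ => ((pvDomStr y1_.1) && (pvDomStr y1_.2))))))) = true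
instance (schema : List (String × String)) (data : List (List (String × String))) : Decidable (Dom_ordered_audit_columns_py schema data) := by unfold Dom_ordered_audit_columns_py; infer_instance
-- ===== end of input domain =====

-- B drops A's seen-set + guarded accumulator: it concatenates all keys, then dedups by
-- repeatedly emitting the head and deleting its later duplicates (alternative algorithm).

-- ===== PORT A =====
-- seen-set + ordered-list, guarded append (literal transliteration of A's two loops)
def ordered_audit_columns_py (schema : List (String × String)) (data : List (List (String × String))) : List String :=
  (data.foldl (fun st row =>
    (row.map Prod.fst).foldl
      (fun st field =>
        if PySem.Set.contains st.1 field then st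
        else (PySem.Set.add st.1 field, st.2 ++ [field])) st)
    ((schema.map Prod.fst).foldl
      (fun st field =>
        if PySem.Set.contains st.1 field then st
        else (PySem.Set.add st.1 field, st.2 ++ [field]))
      ((PySem.Set.empty, []) : PySem.Set String × List String))).2

-- ===== PORT B =====
-- B's while loop: emit the head, drop its later duplicates, repeat
def pvDedupLoop (ks : List String) (ordered : List String) : List String :=
  match ks with
  | [] => ordered
  | head :: rest => pvDedupLoop (rest.filter (fun k => !(k == head))) (ordered ++ [head])
termination_by ks.length
decreasing_by
  first
    | exact Nat.lt_succ_of_le (List.length_filter_le _ rest)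
    | (simp only [List.length_unattach]
       exact Nat.lt_succ_of_le (Nat.le_trans (List.length_filter_le _ _) (by simp)))

def ordered_audit_columns_py_alt (schema : List (String × String)) (data : List (List (String × String))) : List String :=
  pvDedupLoop
    (data.foldl (fun keys row => keys ++ row.map Prod.fst) (schema.map Prod.fst))
    []

-- ===== PRECONDITION & SPEC =====
def Spec_ordered_audit_columns_py (schema : List (String × String)) (data : List (List (String × String))) (out : List String) : Prop := out = ordered_audit_columns_py_alt schema data
instance (schema : List (String × String)) (data : List (List (String × String))) (out : List String) : Decidable (Spec_ordered_audit_columns_py schema data out) := by unfold Spec_ordered_audit_columns_py; infer_instance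

-- ===== CLAIM (what is proved, stated in full; the proofs are below) =====
def Claim_equal_ordered_audit_columns_py : Prop := ∀ (schema : List (String × String)) (data : List (List (String × String))), Dom_ordered_audit_columns_py schema data → Spec_ordered_audit_columns_py schema data (ordered_audit_columns_py schema data)

-- ===== LEMMAS AND PROOFS =====

-- A's guarded step, started from a state whose seen-set and ordered list coincide,
-- is exactly the fold of PySem.Set.add on both components.
theorem foldA_eq_add (l : List String) (s : List String) :
    l.foldl (fun (st : PySem.Set String × List String) field =>
        if PySem.Set.contains st.1 field then st
        else (PySem.Set.add st.1 field, st.2 ++ [field])) (s, s)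
      = (l.foldl PySem.Set.add s, l.foldl PySem.Set.add s) := by
  induction l generalizing s with
  | nil => rfl
  | cons f t ih =>
    simp only [List.foldl_cons]
    have h : (if PySem.Set.contains s f then ((s : PySem.Set String), s)
        else (PySem.Set.add s f, s ++ [f])) = (PySem.Set.add s f, PySem.Set.add s f) := by
      by_cases hm : f ∈ s <;> simp [PySem.Set.add, hm]
    rw [h, ih]

-- folding A's step over the rows = folding it over the concatenated key stream
theorem foldl_rows (data : List (List (String × String)))
    (f : (PySem.Set String × List String) → String → (PySem.Set String × List String))
    (st : PySem.Set String × List String) :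
    data.foldl (fun st row => (row.map Prod.fst).foldl f st) st
      = (data.flatMap (fun row => row.map Prod.fst)).foldl f st := by
  induction data generalizing st with
  | nil => rfl
  | cons r t ih => simp only [List.foldl_cons, List.flatMap_cons, List.foldl_append, ih]

-- B's key-concatenation fold is the same flat stream of keys
theorem foldl_keys (data : List (List (String × String))) (acc : List String) :
    data.foldl (fun keys row => keys ++ row.map Prod.fst) acc
      = acc ++ data.flatMap (fun row => row.map Prod.fst) := by
  induction data generalizing acc with
  | nil => simp
  | cons r t ih => simp [List.foldl_cons, ih]

-- once h is in the accumulator, occurrences of h in the stream are no-ops for Set.add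
theorem foldl_add_filter (t : List String) (acc : List String) (h : String)
    (hmem : h ∈ acc) :
    t.foldl PySem.Set.add acc = (t.filter (fun k => !(k == h))).foldl PySem.Set.add acc := by
  induction t generalizing acc with
  | nil => rfl
  | cons k rest ih =>
    rw [List.filter_cons, List.foldl_cons]
    by_cases hk : k = h
    · rw [if_neg (by simp [hk])]
      rw [PySem.Set.add_of_mem (show k ∈ acc by rw [hk]; exact hmem)]
      exact ih acc hmem
    · rw [if_pos (by simp [hk]), List.foldl_cons]
      exact ih (PySem.Set.add acc k) ((PySem.Set.mem_add acc k h).mpr (Or.inl hmem))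

-- B's loop computes the seen-set fold, provided nothing in ks is already in acc
-- (strong induction on an explicit length bound, since the loop shrinks ks by filtering)
theorem dedupLoop_eq_foldl_aux (n : Nat) : ∀ (ks acc : List String), ks.length ≤ n →
    (∀ x ∈ ks, x ∉ acc) → pvDedupLoop ks acc = ks.foldl PySem.Set.add acc := by
  induction n with
  | zero =>
    intro ks acc hlen _
    have hks : ks = [] := List.eq_nil_of_length_eq_zero (Nat.le_zero.mp hlen)
    subst hks
    simp [pvDedupLoop]
  | succ n ih =>
    intro ks acc hlen hdisj
    cases ks with
    | nil => simp [pvDedupLoop]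
    | cons head rest =>
      have hhead : head ∉ acc := hdisj head (List.mem_cons_self)
      have hadd : PySem.Set.add acc head = acc ++ [head] := PySem.Set.add_of_not_mem hhead
      have hdisj' : ∀ x ∈ rest.filter (fun k => !(k == head)), x ∉ acc ++ [head] := by
        intro x hx
        rw [List.mem_filter] at hx
        have hxne : x ≠ head := by
          intro he; rw [he] at hx; simp at hx
        intro hxa
        rcases List.mem_append.mp hxa with h1 | h2
        · exact hdisj x (List.mem_cons_of_mem _ hx.1) h1
        · exact hxne (List.mem_singleton.mp h2)
      have hlen' : (rest.filter (fun k => !(k == head))).length ≤ n := by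
        have h1 := List.length_filter_le (fun k => !(k == head)) rest
        simp only [List.length_cons] at hlen
        omega
      rw [pvDedupLoop, List.foldl_cons, hadd, ih _ _ hlen' hdisj']
      exact (foldl_add_filter rest (acc ++ [head]) head (by simp)).symm

theorem dedupLoop_eq_foldl (ks acc : List String)
    (hdisj : ∀ x ∈ ks, x ∉ acc) : pvDedupLoop ks acc = ks.foldl PySem.Set.add acc :=
  dedupLoop_eq_foldl_aux ks.length ks acc (Nat.le_refl _) hdisj

theorem ordered_audit_columns_py_spec : Claim_equal_ordered_audit_columns_py := by
  intro schema data _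
  unfold Spec_ordered_audit_columns_py ordered_audit_columns_py ordered_audit_columns_py_alt
  rw [foldl_rows, foldl_keys]
  have h0 : ((PySem.Set.empty : PySem.Set String), ([] : List String))
      = (([] : List String), ([] : List String)) := rfl
  rw [h0, foldA_eq_add, foldA_eq_add]
  rw [← List.foldl_append]
  rw [dedupLoop_eq_foldl _ _ (by simp)]
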